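-- pv_equiv track=rewrite | github.com/BeanMaster1/EvilHangman | EvilHangman.py | generatePatternPermutations
-- ===== SOURCE A (Python) =====
-- def generatePatternPermutations(guess, pattern, index, currPermutation):
--     list = []
--     if index == len(pattern):
--         list.append(currPermutation)
--         return list
--     if pattern[index] == '.':
--         list += generatePatternPermutations(guess, pattern, index + 1, currPermutation + '.') +  generatePatternPermutations(guess, pattern, index + 1, currPermutation + guess)
--     else:
--         list += generatePatternPermutations(guess, pattern, index + 1, currPermutation + pattern[index])
--     return list
-- ===== SOURCE B (Python) =====
-- def generatePatternPermutations(guess, pattern, index, currPermutation):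
--     perms = [currPermutation]
--     for c in pattern[index:]:
--         if c == '.':
--             new = []
--             for p in perms:
--                 new.append(p + '.')
--                 new.append(p + guess)
--             perms = new
--         else:
--             perms = [p + c for p in perms]
--     return perms
-- ===== Notes on version B (the rewrite author's own statement) =====
-- stated objective: simpler
-- what changed: Replaced the binary recursion over indices (one Python call and list concatenation per character per branch) by a single iterative left-to-right pass that maintains the list of prefix strings, expanding it in place at each dot.
-- outside the precondition, e.g. on generatePatternPermutations('x', 'ab', -1, ''): A returns ['bab'], B returns ['b']; on generatePatternPermutations('x', 'ab', 3, ''): A raises IndexError, B returns ['']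
import Mathlib
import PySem

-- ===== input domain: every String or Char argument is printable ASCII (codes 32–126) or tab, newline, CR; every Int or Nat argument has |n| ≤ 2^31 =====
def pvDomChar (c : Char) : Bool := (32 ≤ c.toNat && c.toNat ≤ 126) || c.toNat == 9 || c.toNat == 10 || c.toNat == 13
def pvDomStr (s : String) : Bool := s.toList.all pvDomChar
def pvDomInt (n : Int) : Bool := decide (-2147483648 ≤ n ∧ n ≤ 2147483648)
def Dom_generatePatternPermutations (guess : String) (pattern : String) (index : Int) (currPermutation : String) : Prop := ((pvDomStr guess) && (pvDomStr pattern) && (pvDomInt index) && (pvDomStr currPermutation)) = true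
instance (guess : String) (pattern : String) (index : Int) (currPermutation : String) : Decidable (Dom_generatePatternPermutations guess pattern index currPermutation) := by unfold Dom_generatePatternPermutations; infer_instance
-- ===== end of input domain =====

-- B replaces A's binary recursion by one iterative pass maintaining the list of prefixes (objective: simpler).


-- ===== PORT A =====
-- A's recursion, with fuel = number of remaining positions (exact on Pre_: 0 ≤ index ≤ len,
-- where the fuel never runs out before the base case `index == len(pattern)`).
def pvAgo (guess : String) (pat : List Char) (index : Int) (curr : String) (fuel : Nat) : List String :=
  if index = (pat.length : Int) then [curr]
  else
    match fuel with
    | 0 => []   -- unreachable under Pre_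
    | fuel + 1 =>
      match PySem.List.pyGet? pat index with
      | none => []   -- IndexError in Python; excluded by Pre_
      | some c =>
        if c = '.' then
          pvAgo guess pat (index + 1) (curr ++ ".") fuel ++ pvAgo guess pat (index + 1) (curr ++ guess) fuel
        else
          pvAgo guess pat (index + 1) (curr ++ c.toString) fuel

def generatePatternPermutations (guess : String) (pattern : String) (index : Int) (currPermutation : String) : List String :=
  pvAgo guess pattern.toList index currPermutation ((pattern.toList.length : Int) - index).toNat

-- ===== PORT B =====
-- one step of B's loop body
def pvBstep (guess : String) (perms : List String) (c : Char) : List String :=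
  if c = '.' then
    perms.foldl (fun acc p => acc ++ [p ++ ".", p ++ guess]) []
  else
    perms.map (fun p => p ++ c.toString)

def generatePatternPermutations_alt (guess : String) (pattern : String) (index : Int) (currPermutation : String) : List String :=
  (PySem.List.slice pattern.toList (some index) none).foldl (pvBstep guess) [currPermutation]

-- ===== PRECONDITION & SPEC =====
-- Pre_ restricts index to the function's natural domain 0..len(pattern): for index > len (or index < -len)
-- A raises IndexError, and for negative index A's value is an accident of Python's negative-index wraparound
-- (it reads pattern[index] and then restarts from position 0), outside the recursion's intended use.
def Pre_generatePatternPermutations (guess : String) (pattern : String) (index : Int) (currPermutation : String) : Prop :=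
  0 ≤ index ∧ index ≤ (pattern.toList.length : Int)
instance (guess : String) (pattern : String) (index : Int) (currPermutation : String) : Decidable (Pre_generatePatternPermutations guess pattern index currPermutation) := by unfold Pre_generatePatternPermutations; infer_instance

def pvWitness_generatePatternPermutations : String × String × Int × String := ("x", "a.b", 1, "q")

def Spec_generatePatternPermutations (guess : String) (pattern : String) (index : Int) (currPermutation : String) (out : List String) : Prop := out = generatePatternPermutations_alt guess pattern index currPermutation
instance (guess : String) (pattern : String) (index : Int) (currPermutation : String) (out : List String) : Decidable (Spec_generatePatternPermutations guess pattern index currPermutation out) := by unfold Spec_generatePatternPermutations; infer_instance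

-- ===== CLAIM (what is proved, stated in full; the proofs are below) =====
def Claim_equal_generatePatternPermutations : Prop := ∀ (guess : String) (pattern : String) (index : Int) (currPermutation : String), Dom_generatePatternPermutations guess pattern index currPermutation → Pre_generatePatternPermutations guess pattern index currPermutation → Spec_generatePatternPermutations guess pattern index currPermutation (generatePatternPermutations guess pattern index currPermutation)

-- ===== LEMMAS AND PROOFS =====

theorem pvBstep_append (guess : String) (l₁ l₂ : List String) (c : Char) :
    pvBstep guess (l₁ ++ l₂) c = pvBstep guess l₁ c ++ pvBstep guess l₂ c := by
  unfold pvBstep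
  split_ifs with h
  · simp
  · simp

theorem pvBloop_append (guess : String) (chars : List Char) (l₁ l₂ : List String) :
    chars.foldl (pvBstep guess) (l₁ ++ l₂)
      = chars.foldl (pvBstep guess) l₁ ++ chars.foldl (pvBstep guess) l₂ := by
  induction chars generalizing l₁ l₂ with
  | nil => simp
  | cons c cs ih => simp [List.foldl, pvBstep_append, ih]

theorem pvMain (guess : String) (pat : List Char) :
    ∀ (fuel : Nat) (n : Nat) (curr : String), n ≤ pat.length → pat.length - n = fuel →
      pvAgo guess pat (n : Int) curr fuel = (pat.drop n).foldl (pvBstep guess) [curr] := by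
  intro fuel
  induction fuel with
  | zero =>
    intro n curr hle hf
    have hn : n = pat.length := by omega
    subst hn
    simp [pvAgo]
  | succ fuel ih =>
    intro n curr hle hf
    have hlt : n < pat.length := by omega
    have hne : (n : Int) ≠ (pat.length : Int) := by
      intro h; omega
    have hget : PySem.List.pyGet? pat (n : Int) = some pat[n] := by
      simp [PySem.List.pyGet?_natCast, List.getElem?_eq_getElem hlt]
    have hdrop : pat.drop n = pat[n] :: pat.drop (n + 1) := List.drop_eq_getElem_cons hlt
    have hcast : ((n : Int) + 1) = ((n + 1 : Nat) : Int) := by push_cast; ring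
    rw [pvAgo, if_neg hne, hget]
    by_cases hc : pat[n] = '.'
    · simp only [hc, if_pos]
      rw [hcast, ih (n + 1) (curr ++ ".") (by omega) (by omega),
          ih (n + 1) (curr ++ guess) (by omega) (by omega),
          ← pvBloop_append, hdrop]
      simp [List.foldl, pvBstep, hc]
    · simp only [if_neg hc]
      rw [hcast, ih (n + 1) (curr ++ pat[n].toString) (by omega) (by omega), hdrop]
      simp [List.foldl, pvBstep, hc]

-- ===== VERDICT (by name: the statement is the Claim_ definition above) =====
theorem generatePatternPermutations_spec : Claim_equal_generatePatternPermutations := by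
  intro guess pattern index currPermutation _hDom hPre
  obtain ⟨h0, hlen⟩ := hPre
  unfold Spec_generatePatternPermutations generatePatternPermutations generatePatternPermutations_alt
  rw [PySem.List.slice_from _ h0]
  have hidx : index = ((index.toNat : Nat) : Int) := (Int.toNat_of_nonneg h0).symm
  rw [hidx]
  exact pvMain guess pattern.toList _ index.toNat currPermutation (by omega) (by omega)
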